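-- pv_equiv track=rewrite | github.com/ethanKim93/algorithm_group_study | 0930/오수경/5185_이진수/s1.py | num_bit
-- ===== SOURCE A (Python) =====
-- def num_bit(num):
--     output = ""
--     for j in range(3, -1, -1):
--         if num & (1<<j):
--             output += '1'
--         else:
--             output += '0'
--     return output
-- ===== SOURCE B (Python) =====
-- TABLE = [format(i, '04b') for i in range(16)]
--
--
-- def num_bit(num):
--     return TABLE[num & 15]
-- ===== Notes on version B (the rewrite author's own statement) =====
-- stated objective: idiomatic
-- what changed: Replaces the per-bit loop that builds the string one tested bit at a time with a single low-nibble mask and one lookup into a precomputed table of all four-bit strings.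
import Mathlib
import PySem

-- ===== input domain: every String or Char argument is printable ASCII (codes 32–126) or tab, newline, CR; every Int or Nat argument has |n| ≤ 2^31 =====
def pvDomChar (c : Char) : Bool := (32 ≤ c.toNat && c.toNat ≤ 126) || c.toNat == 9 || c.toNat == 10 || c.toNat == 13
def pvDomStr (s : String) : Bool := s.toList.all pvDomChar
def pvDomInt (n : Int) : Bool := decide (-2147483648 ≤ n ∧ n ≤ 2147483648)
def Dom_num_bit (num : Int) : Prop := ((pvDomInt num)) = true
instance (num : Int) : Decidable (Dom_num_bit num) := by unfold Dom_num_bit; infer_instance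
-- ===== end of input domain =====

-- B replaces A's per-bit loop with one low-nibble mask and a lookup in a precomputed table of the four-bit strings.

-- ===== PORT A =====
-- for j in range(3, -1, -1): output += '1' if num & (1<<j) else '0'
-- (j ranges over [3,2,1,0], so j.toNat is exact for the shift 1<<j)
def num_bit (num : Int) : String :=
  (PySem.List.pyRange 3 (-1) (-1)).foldl
    (fun output j =>
      if PySem.Int.band num ((1 : Int) <<< j.toNat) ≠ 0 then output ++ "1" else output ++ "0")
    ""

-- ===== PORT B =====
-- TABLE = [format(i, '04b') for i in range(16)], written out as literals
def numBitTable : List String :=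
  ["0000", "0001", "0010", "0011", "0100", "0101", "0110", "0111",
   "1000", "1001", "1010", "1011", "1100", "1101", "1110", "1111"]

-- return TABLE[num & 15]; num & 15 is always in [0, 16), so the getD default is never used
def num_bit_alt (num : Int) : String :=
  (PySem.List.pyGet? numBitTable (PySem.Int.band num 15)).getD ""

-- ===== PRECONDITION & SPEC =====
def Spec_num_bit (num : Int) (out : String) : Prop := out = num_bit_alt num
instance (num : Int) (out : String) : Decidable (Spec_num_bit num out) := by unfold Spec_num_bit; infer_instance

-- ===== CLAIM (what is proved, stated in full; the proofs are below) =====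
def Claim_equal_num_bit : Prop := ∀ (num : Int), Dom_num_bit num → Spec_num_bit num (num_bit num)

-- ===== LEMMAS AND PROOFS =====

-- low-4-bit complement flips each of the low 4 bits
theorem testBit_fifteen_sub (R j : Nat) (hR : R < 16) (hj : j < 4) :
    (15 - R).testBit j = !R.testBit j := by
  interval_cases j <;> interval_cases R <;> decide

-- Python's  n & (1<<j)  for j < 4 depends only on n mod 16
theorem band_two_pow (n : Int) (j : Nat) (hj : j < 4) :
    PySem.Int.band n ((2 : Int) ^ j) = ((n % 16).toNat &&& 2 ^ j : Nat) := by
  have hp : (0 : Int) ≤ (2 : Int) ^ j := by positivity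
  have hr0 : (0 : Int) ≤ n % 16 := Int.emod_nonneg n (by norm_num)
  have hrlt : n % 16 < 16 := Int.emod_lt_of_pos n (by norm_num)
  have hRcast : ((n % 16).toNat : Int) = n % 16 := Int.toNat_of_nonneg hr0
  have hRlt : (n % 16).toNat < 16 := by omega
  have hpN : ((2 : Int) ^ j).toNat = 2 ^ j := by
    interval_cases j <;> decide
  by_cases hn : 0 ≤ n
  · rw [PySem.Int.band, if_pos hn, if_pos hp, hpN]
    have h1 : n.toNat % 16 = (n % 16).toNat := by omega
    rw [Nat.and_two_pow, Nat.and_two_pow, ← h1]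
    rw [show (16 : Nat) = 2 ^ 4 from rfl, Nat.testBit_mod_two_pow]
    simp [hj]
  · rw [PySem.Int.band, if_neg hn, if_pos hp, hpN]
    set M : Nat := (-n - 1).toNat with hM
    set R : Nat := (n % 16).toNat with hRdef
    have hMcast : (M : Int) = -n - 1 := Int.toNat_of_nonneg (by omega)
    have hMmod : M % 16 = 15 - R := by
      have h1 : ((M % 16 : Nat) : Int) = (M : Int) % 16 := by push_cast; ring_nf
      have h2 : (-n - 1) % 16 = 15 - n % 16 := by omega
      omega
    have htB : M.testBit j = !R.testBit j := by
      have : M.testBit j = (M % 16).testBit j := by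
        rw [show (16 : Nat) = 2 ^ 4 from rfl, Nat.testBit_mod_two_pow]; simp [hj]
      rw [this, hMmod, testBit_fifteen_sub R j hRlt hj]
    rw [Nat.two_pow_and, htB, Nat.and_two_pow]
    cases hb : R.testBit j <;> simp

-- Python's  n & 15  is n mod 16
theorem band_fifteen (n : Int) : PySem.Int.band n 15 = n % 16 := by
  have hr0 : (0 : Int) ≤ n % 16 := Int.emod_nonneg n (by norm_num)
  by_cases hn : 0 ≤ n
  · rw [PySem.Int.band, if_pos hn, if_pos (by norm_num)]
    have : n.toNat &&& (15 : Int).toNat = n.toNat % 16 := by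
      rw [show (15 : Int).toNat = 2 ^ 4 - 1 from rfl, Nat.and_two_pow_sub_one_eq_mod]
    rw [this]; omega
  · rw [PySem.Int.band, if_neg hn, if_pos (by norm_num)]
    set M : Nat := (-n - 1).toNat with hM
    have hMcast : (M : Int) = -n - 1 := Int.toNat_of_nonneg (by omega)
    have hand : (15 : Int).toNat &&& M = M % 16 := by
      rw [Nat.land_comm, show (15 : Int).toNat = 2 ^ 4 - 1 from rfl,
        Nat.and_two_pow_sub_one_eq_mod]
    rw [hand]
    have h1 : ((M % 16 : Nat) : Int) = (M : Int) % 16 := by push_cast; ring_nf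
    have h2 : (-n - 1) % 16 = 15 - n % 16 := by omega
    omega

-- the same, phrased exactly as the port writes the mask  1 << j  (j a nonnegative Int)
theorem band_shift (n : Int) (j : Int) (h0 : 0 ≤ j) (h4 : j < 4) :
    PySem.Int.band n ((1 : Int) <<< (j.toNat : Int)) = ((n % 16).toNat &&& 2 ^ j.toNat : Nat) := by
  have hsh : ((1 : Int) <<< (j.toNat : Int)) = (2 : Int) ^ j.toNat := by
    have : j.toNat < 4 := by omega
    interval_cases h : j.toNat <;> decide
  rw [hsh, band_two_pow n j.toNat (by omega)]

-- ===== VERDICT (by name: the statement is the Claim_ definition above) =====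
theorem num_bit_spec : Claim_equal_num_bit := by
  intro n _
  unfold Spec_num_bit num_bit num_bit_alt
  have hrange : PySem.List.pyRange 3 (-1) (-1) = [3, 2, 1, 0] := by decide
  rw [hrange, band_fifteen]
  simp only [List.foldl]
  rw [band_shift n 3 (by norm_num) (by norm_num), band_shift n 2 (by norm_num) (by norm_num),
    band_shift n 1 (by norm_num) (by norm_num), band_shift n 0 (by norm_num) (by norm_num)]
  have hr0 : (0 : Int) ≤ n % 16 := Int.emod_nonneg n (by norm_num)
  have hrlt : n % 16 < 16 := Int.emod_lt_of_pos n (by norm_num)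
  rw [show n % 16 = ((n % 16).toNat : Int) from (Int.toNat_of_nonneg hr0).symm]
  set R : Nat := (n % 16).toNat with hRdef
  have hRlt : R < 16 := by omega
  clear_value R
  interval_cases R <;> decide
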